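-- pv_equiv track=rewrite | github.com/Leapense/problems | 13379번: Far Far Away/solution.py | longestPathFromRoot
-- ===== SOURCE A (Python) =====
-- from collections import defaultdict, deque
-- from typing import DefaultDict, List, Tuple
--
-- def longestPathFromRoot(cityCount: int, edges: List[Tuple[int, int, int]]) -> int:
--     """
--     Calculates the longest path from the root city (assumed to be city 1) in a directed, weighted graph.
--
--     Args:
--         cityCount (int): The number of cities (nodes) in the graph.
--         edges (List[Tuple[int, int, int]]): A list of edges where each edge is represented
--             as a tuple (parent, child, weight), indicating a directed edge from 'parent' to 'child'
--             with the given 'weight'.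
--
--     Returns:
--         int: The maximum distance from the root city to any other city in the graph.
--     """
--
--     adjacency: DefaultDict[int, List[Tuple[int, int]]] = defaultdict(list)
--     for parent, child, weight in edges:
--         adjacency[parent].append((child, weight))
--
--     queue: deque[Tuple[int, int]] = deque([(1, 0)])
--     maxDistance: int = 0
--
--     while queue:
--         city, distanceSoFar = queue.popleft()
--         if distanceSoFar > maxDistance:
--             maxDistance = distanceSoFar
--
--         for child, weight in adjacency.get(city, []):
--             queue.append((child, distanceSoFar + weight))
--
--     return maxDistance
-- ===== SOURCE B (Python) =====
-- def longestPathFromRoot(cityCount, edges):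
--     adjacency = {}
--     for parent, child, weight in edges:
--         adjacency.setdefault(parent, []).append((child, weight))
--
--     def dfs(node):
--         best = 0
--         for child, weight in adjacency.get(node, []):
--             best = max(best, weight + dfs(child))
--         return best
--
--     return dfs(1)
-- ===== Notes on version B (the rewrite author's own statement) =====
-- stated objective: alternative
-- what changed: Replaced the iterative BFS queue of (node, cumulative-distance) pairs with an external running maximum by a recursive DFS that returns each node's best downward path sum (floored at 0), so the answer is dfs(1) instead of a maximum over all enqueued prefix sums.
import Mathlib
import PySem

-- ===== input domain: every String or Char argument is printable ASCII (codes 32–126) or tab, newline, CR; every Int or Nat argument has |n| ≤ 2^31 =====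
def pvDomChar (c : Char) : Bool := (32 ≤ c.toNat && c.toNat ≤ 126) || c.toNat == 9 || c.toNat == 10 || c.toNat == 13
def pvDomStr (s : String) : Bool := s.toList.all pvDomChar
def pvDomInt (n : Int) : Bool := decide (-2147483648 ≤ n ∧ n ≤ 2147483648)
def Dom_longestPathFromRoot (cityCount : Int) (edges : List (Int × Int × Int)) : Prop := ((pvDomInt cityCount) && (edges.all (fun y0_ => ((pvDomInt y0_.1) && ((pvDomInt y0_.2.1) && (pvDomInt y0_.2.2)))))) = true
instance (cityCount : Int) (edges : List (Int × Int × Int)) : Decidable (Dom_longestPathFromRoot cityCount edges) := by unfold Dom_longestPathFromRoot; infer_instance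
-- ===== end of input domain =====

-- B replaces A's BFS queue + external running maximum by a recursive DFS returning each
-- node's best downward path sum (alternative decomposition, no speed claim).
-- Both Python versions terminate exactly when no cycle is reachable from city 1; the ports
-- make the traversals total with a per-child guard (the reachable-set size pvM strictly
-- decreases along an edge), which always holds under Pre_ and is a totality device only.

-- ===== PORT A =====
-- graph vocabulary shared by both ports' termination measures (not part of either algorithm):
-- successors of a node, one reachability-closure step, the node universe, and
-- pvM c = size of the set of nodes reachable from c (strictly decreasing along DAG edges).
def pvSuccs (edges : List (Int × Int × Int)) (c : Int) : List Int :=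
  (edges.filter (fun e => e.1 == c)).map (fun e => e.2.1)

def pvStep (edges : List (Int × Int × Int)) (S : List Int) : List Int :=
  (S ++ S.flatMap (pvSuccs edges)).dedup

def pvNodes (edges : List (Int × Int × Int)) : List Int :=
  (1 :: edges.flatMap (fun e => [e.1, e.2.1])).dedup

def pvN (edges : List (Int × Int × Int)) : Nat := (pvNodes edges).length

def pvReach (edges : List (Int × Int × Int)) (c : Int) : List Int :=
  (pvStep edges)^[pvN edges] [c]

def pvM (edges : List (Int × Int × Int)) (c : Int) : Nat := (pvReach edges c).length

-- the BFS while-loop of A: queue of (city, distanceSoFar), running maxDistance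
def pvLoopA (edges : List (Int × Int × Int)) (adj : PySem.Dict Int (List (Int × Int))) (K : Nat) :
    List (Int × Int) → Int → Int
  | [], m => m
  | (c, d) :: q, m =>
    let m' := if d > m then d else m
    let children := adj.getD c []
    if h : (∀ p ∈ children, pvM edges p.1 < pvM edges c) ∧ children.length < K then
      pvLoopA edges adj K (q ++ children.map (fun p => (p.1, d + p.2))) m'
    else m'  -- unreachable under Pre_ (guard only makes the loop total)
termination_by q _ => (q.map (fun p => K ^ pvM edges p.1)).sum
decreasing_by
  simp only [children] at h ⊢
  have hK : 0 < K := by omega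
  have key : (((adj.getD c []).map fun p => (p.1, d + p.2)).map fun p => K ^ pvM edges p.1).sum
      < K ^ pvM edges c := by
    rw [List.map_map]
    rcases hch : adj.getD c [] with _ | ⟨p0, rest⟩
    · simpa using Nat.pow_pos hK
    · have hp0 := h.1 p0 (by rw [hch]; exact List.mem_cons_self)
      have hec : 1 ≤ pvM edges c := by omega
      have hbound : ∀ x ∈ (p0 :: rest).map ((fun p => K ^ pvM edges p.1) ∘ (fun p : Int × Int => (p.1, d + p.2))),
          x ≤ K ^ (pvM edges c - 1) := by
        intro x hx
        rcases List.mem_map.1 hx with ⟨p, hp, rfl⟩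
        have hpc := h.1 p (by rw [hch]; exact hp)
        simp only [Function.comp_apply]
        exact Nat.pow_le_pow_right hK (by omega)
      have hsum := List.sum_le_card_nsmul _ _ hbound
      have hlen : ((p0 :: rest)).length ≤ K - 1 := by
        have := h.2; rw [hch] at this; omega
      calc ((p0 :: rest).map ((fun p => K ^ pvM edges p.1) ∘ (fun p : Int × Int => (p.1, d + p.2)))).sum
          ≤ ((p0 :: rest).map _).length • K ^ (pvM edges c - 1) := hsum
        _ = (p0 :: rest).length * K ^ (pvM edges c - 1) := by
            rw [List.length_map, smul_eq_mul]
        _ ≤ (K - 1) * K ^ (pvM edges c - 1) := by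
            exact Nat.mul_le_mul_right _ hlen
        _ < K * K ^ (pvM edges c - 1) := by
            have hx : 0 < K ^ (pvM edges c - 1) := Nat.pow_pos hK
            exact Nat.mul_lt_mul_of_lt_of_le (by omega) (le_refl _) hx
        _ = K ^ pvM edges c := by
            rw [← Nat.pow_succ']
            congr 1
            omega
  simp only [List.map_append, List.sum_append, List.map_cons, List.sum_cons]
  omega

def longestPathFromRoot (cityCount : Int) (edges : List (Int × Int × Int)) : Int :=
  let adjacency : PySem.Dict Int (List (Int × Int)) :=
    edges.foldl (fun d e => d.modify e.1 [] (· ++ [e.2])) PySem.Dict.empty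
  pvLoopA edges adjacency (edges.length + 1) [(1, 0)] 0

-- ===== PORT B =====
mutual
  -- dfs(node): best = 0; for child, weight in adjacency.get(node, []): best = max(best, weight + dfs(child))
  def pvDfsNode (edges : List (Int × Int × Int)) (adj : PySem.Dict Int (List (Int × Int))) (c : Int) : Int :=
    pvDfsList edges adj c (adj.getD c []) 0
  termination_by (pvM edges c, (adj.getD c []).length + 1)
  decreasing_by exact Prod.Lex.right _ (Nat.lt_succ_self _)
  def pvDfsList (edges : List (Int × Int × Int)) (adj : PySem.Dict Int (List (Int × Int))) (c : Int) :
      List (Int × Int) → Int → Int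
    | [], best => best
    | (ch, w) :: rest, best =>
      if h : pvM edges ch < pvM edges c then
        pvDfsList edges adj c rest (max best (w + pvDfsNode edges adj ch))
      else pvDfsList edges adj c rest best  -- unreachable under Pre_ (totality guard)
  termination_by l _ => (pvM edges c, l.length)
  decreasing_by
    · exact Prod.Lex.left _ _ h
    · exact Prod.Lex.right _ (Nat.lt_succ_self _)
    · exact Prod.Lex.right _ (Nat.lt_succ_self _)
end

def longestPathFromRoot_alt (cityCount : Int) (edges : List (Int × Int × Int)) : Int :=
  let adjacency : PySem.Dict Int (List (Int × Int)) :=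
    edges.foldl (fun d e => d.modify e.1 [] (· ++ [e.2])) PySem.Dict.empty
  pvDfsNode edges adjacency 1

-- ===== PRECONDITION & SPEC =====
-- Pre_ excludes exactly the inputs on which Python A DIVERGES (its BFS queue never empties):
-- those where some node reachable from city 1 lies on a cycle.  It is the graph condition
-- "no node reachable from 1 is reachable from itself in one or more steps", decided by a
-- standard reachability closure over the edge list, not by either port's traversal.
def Pre_longestPathFromRoot (cityCount : Int) (edges : List (Int × Int × Int)) : Prop :=
  ∀ c ∈ pvReach edges 1, c ∉ (pvStep edges)^[pvN edges] (pvSuccs edges c)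
instance (cityCount : Int) (edges : List (Int × Int × Int)) : Decidable (Pre_longestPathFromRoot cityCount edges) := by unfold Pre_longestPathFromRoot; infer_instance

def pvWitness_longestPathFromRoot : Int × (List (Int × Int × Int)) :=
  (4, [(1, 2, 5), (2, 3, 1), (1, 4, 2)])

def Spec_longestPathFromRoot (cityCount : Int) (edges : List (Int × Int × Int)) (out : Int) : Prop := out = longestPathFromRoot_alt cityCount edges
instance (cityCount : Int) (edges : List (Int × Int × Int)) (out : Int) : Decidable (Spec_longestPathFromRoot cityCount edges out) := by unfold Spec_longestPathFromRoot; infer_instance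

-- ===== CLAIM (what is proved, stated in full; the proofs are below) =====
def Claim_equal_longestPathFromRoot : Prop := ∀ (cityCount : Int) (edges : List (Int × Int × Int)), Dom_longestPathFromRoot cityCount edges → Pre_longestPathFromRoot cityCount edges → Spec_longestPathFromRoot cityCount edges (longestPathFromRoot cityCount edges)

-- ===== LEMMAS AND PROOFS =====

-- membership facts about the reachability closure -------------------------------------

lemma pv_succs_subset_nodes (edges : List (Int × Int × Int)) (c y : Int)
    (h : y ∈ pvSuccs edges c) : y ∈ pvNodes edges := by
  rcases List.mem_map.1 h with ⟨e, he, rfl⟩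
  have heE : e ∈ edges := (List.mem_filter.1 he).1
  simp only [pvNodes, List.mem_dedup, List.mem_cons, List.mem_flatMap]
  exact Or.inr ⟨e, heE, by simp⟩

lemma pv_mem_step_self (edges : List (Int × Int × Int)) (S : List Int) (x : Int)
    (h : x ∈ S) : x ∈ pvStep edges S := by
  simp only [pvStep, List.mem_dedup, List.mem_append]
  exact Or.inl h

lemma pv_mem_step_succ (edges : List (Int × Int × Int)) (S : List Int) (x y : Int)
    (hx : x ∈ S) (hy : y ∈ pvSuccs edges x) : y ∈ pvStep edges S := by
  simp only [pvStep, List.mem_dedup, List.mem_append, List.mem_flatMap]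
  exact Or.inr ⟨x, hx, hy⟩

lemma pv_mem_step_cases (edges : List (Int × Int × Int)) (S : List Int) (y : Int)
    (h : y ∈ pvStep edges S) : y ∈ S ∨ ∃ x ∈ S, y ∈ pvSuccs edges x := by
  simpa only [pvStep, List.mem_dedup, List.mem_append, List.mem_flatMap] using h

lemma pv_step_mono (edges : List (Int × Int × Int)) (A B : List Int)
    (h : ∀ x ∈ A, x ∈ B) (y : Int) (hy : y ∈ pvStep edges A) : y ∈ pvStep edges B := by
  rcases pv_mem_step_cases edges A y hy with h1 | ⟨x, hx, hxy⟩
  · exact pv_mem_step_self edges B y (h y h1)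
  · exact pv_mem_step_succ edges B x y (h x hx) hxy

lemma pv_step_congr (edges : List (Int × Int × Int)) (A B : List Int)
    (h : ∀ x, x ∈ A ↔ x ∈ B) (y : Int) : y ∈ pvStep edges A ↔ y ∈ pvStep edges B :=
  ⟨pv_step_mono edges A B (fun x hx => (h x).1 hx) y,
   pv_step_mono edges B A (fun x hx => (h x).2 hx) y⟩

lemma pv_subset_iterate (edges : List (Int × Int × Int)) (S : List Int) (k : Nat)
    (x : Int) (h : x ∈ S) : x ∈ (pvStep edges)^[k] S := by
  induction k with
  | zero => exact h
  | succ k ih =>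
    rw [Function.iterate_succ_apply']
    exact pv_mem_step_self edges _ x ih

lemma pv_iterate_grow (edges : List (Int × Int × Int)) (S : List Int) (k : Nat)
    (x : Int) (h : x ∈ (pvStep edges)^[k] S) : x ∈ (pvStep edges)^[k+1] S := by
  rw [Function.iterate_succ_apply']
  exact pv_mem_step_self edges _ x h

lemma pv_iterate_mono (edges : List (Int × Int × Int)) (A B : List Int) (k : Nat)
    (h : ∀ x ∈ A, x ∈ B) :
    ∀ y ∈ (pvStep edges)^[k] A, y ∈ (pvStep edges)^[k] B := by
  induction k with
  | zero => exact h
  | succ k ih =>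
    intro y hy
    rw [Function.iterate_succ_apply'] at hy ⊢
    exact pv_step_mono edges _ _ ih y hy

lemma pv_iterate_subset_nodes (edges : List (Int × Int × Int)) (S : List Int) (k : Nat)
    (h : ∀ x ∈ S, x ∈ pvNodes edges) :
    ∀ y ∈ (pvStep edges)^[k] S, y ∈ pvNodes edges := by
  induction k with
  | zero => exact h
  | succ k ih =>
    intro y hy
    rw [Function.iterate_succ_apply'] at hy
    rcases pv_mem_step_cases edges _ y hy with h1 | ⟨x, hx, hxy⟩
    · exact ih y h1
    · exact pv_succs_subset_nodes edges x y hxy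

-- absorption: a successor-closed superset of S contains every iterate of S
lemma pv_closed_absorb (edges : List (Int × Int × Int)) (T S : List Int)
    (hT : ∀ x ∈ T, ∀ y ∈ pvSuccs edges x, y ∈ T) (hS : ∀ x ∈ S, x ∈ T) (k : Nat) :
    ∀ y ∈ (pvStep edges)^[k] S, y ∈ T := by
  induction k with
  | zero => exact hS
  | succ k ih =>
    intro y hy
    rw [Function.iterate_succ_apply'] at hy
    rcases pv_mem_step_cases edges _ y hy with h1 | ⟨x, hx, hxy⟩
    · exact ih y h1
    · exact hT x (ih x hx) y hxy

lemma pv_nodup_iterate (edges : List (Int × Int × Int)) (S : List Int) (k : Nat) :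
    ((pvStep edges)^[k+1] S).Nodup := by
  rw [Function.iterate_succ_apply']
  exact List.nodup_dedup _

lemma pv_one_mem_nodes (edges : List (Int × Int × Int)) : (1 : Int) ∈ pvNodes edges := by
  simp [pvNodes, List.mem_dedup]

lemma pv_pvN_pos (edges : List (Int × Int × Int)) : 1 ≤ pvN edges :=
  List.length_pos_of_mem (pv_one_mem_nodes edges)

-- stabilisation: after pvN iterations the closure of any set of nodes is successor-closed
lemma pv_reach_closed (edges : List (Int × Int × Int)) (S : List Int)
    (hS : ∀ x ∈ S, x ∈ pvNodes edges) :
    ∀ x ∈ (pvStep edges)^[pvN edges] S, ∀ y ∈ pvSuccs edges x,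
      y ∈ (pvStep edges)^[pvN edges] S := by
  by_cases hstab : ∃ k < pvN edges, ∀ z, z ∈ (pvStep edges)^[k+1] S ↔ z ∈ (pvStep edges)^[k] S
  · rcases hstab with ⟨k, hk, heq⟩
    have hfix : ∀ m, k ≤ m → ∀ z, z ∈ (pvStep edges)^[m] S ↔ z ∈ (pvStep edges)^[k] S := by
      intro m hm
      induction m, hm using Nat.le_induction with
      | base => intro z; rfl
      | succ m hm ih =>
        intro z
        have hk1 := heq z
        rw [Function.iterate_succ_apply'] at hk1
        rw [Function.iterate_succ_apply']
        rw [pv_step_congr edges _ _ ih z]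
        exact hk1
    intro x hx y hy
    have hxk : x ∈ (pvStep edges)^[k] S := (hfix _ (le_of_lt hk) x).1 hx
    have hy1 : y ∈ (pvStep edges)^[k+1] S := by
      rw [Function.iterate_succ_apply']
      exact pv_mem_step_succ edges _ x y hxk hy
    exact (hfix _ (le_of_lt hk) y).2 ((heq y).1 hy1)
  · -- no stabilisation before pvN: the closure has grown to the whole node universe
    push Not at hstab
    have hgrow : ∀ k < pvN edges,
        ((pvStep edges)^[k] S).toFinset.card + 1 ≤ ((pvStep edges)^[k+1] S).toFinset.card := by
      intro k hk
      rcases hstab k hk with ⟨z, hz⟩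
      have hsub : ((pvStep edges)^[k] S).toFinset ⊆ ((pvStep edges)^[k+1] S).toFinset := by
        intro a ha
        rw [List.mem_toFinset] at ha ⊢
        exact pv_iterate_grow edges S k a ha
      have hzz : z ∈ (pvStep edges)^[k+1] S ∧ z ∉ (pvStep edges)^[k] S := by
        rcases hz with ⟨h2, h1⟩ | ⟨h2, h1⟩
        · exact ⟨h2, h1⟩
        · exact absurd (pv_iterate_grow edges S k z h1) h2
      exact Finset.card_lt_card (Finset.ssubset_iff_of_subset hsub |>.2
        ⟨z, List.mem_toFinset.2 hzz.1, fun hzk => hzz.2 (List.mem_toFinset.1 hzk)⟩)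
    have hcard : ∀ k, k ≤ pvN edges → k ≤ ((pvStep edges)^[k] S).toFinset.card := by
      intro k
      induction k with
      | zero => intro _; exact Nat.zero_le _
      | succ k ih =>
        intro hk
        have h1 := ih (Nat.le_of_succ_le hk)
        have h2 := hgrow k (Nat.lt_of_succ_le hk)
        omega
    have hsubU : ((pvStep edges)^[pvN edges] S).toFinset ⊆ (pvNodes edges).toFinset := by
      intro a ha
      rw [List.mem_toFinset] at ha ⊢
      exact pv_iterate_subset_nodes edges S (pvN edges) hS a ha
    have hcardU : (pvNodes edges).toFinset.card = pvN edges := by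
      rw [List.toFinset_card_of_nodup (by exact List.nodup_dedup _)]
      rfl
    have heqU : ((pvStep edges)^[pvN edges] S).toFinset = (pvNodes edges).toFinset := by
      apply Finset.eq_of_subset_of_card_le hsubU
      rw [hcardU]
      exact hcard (pvN edges) (le_refl _)
    intro x hx y hy
    have : y ∈ (pvNodes edges).toFinset := List.mem_toFinset.2 (pv_succs_subset_nodes edges x y hy)
    rw [← heqU, List.mem_toFinset] at this
    exact this

-- the key ordering fact: under Pre_, along an edge out of a node reachable from 1
-- the child stays reachable and its reachable-set size strictly drops
lemma pv_key (cityCount : Int) (edges : List (Int × Int × Int))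
    (hpre : Pre_longestPathFromRoot cityCount edges) :
    ∀ c ∈ pvReach edges 1, ∀ ch ∈ pvSuccs edges c,
      ch ∈ pvReach edges 1 ∧ pvM edges ch < pvM edges c := by
  intro c hc ch hch
  have hcU : c ∈ pvNodes edges :=
    pv_iterate_subset_nodes edges [1] (pvN edges)
      (by intro x hx; simp only [List.mem_singleton] at hx; subst hx; exact pv_one_mem_nodes edges)
      c hc
  have hreach1 : ch ∈ pvReach edges 1 :=
    pv_reach_closed edges [1]
      (by intro x hx; simp only [List.mem_singleton] at hx; subst hx; exact pv_one_mem_nodes edges)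
      c hc ch hch
  refine ⟨hreach1, ?_⟩
  -- c ∈ R(c)
  have hcRc : c ∈ pvReach edges c :=
    pv_subset_iterate edges [c] (pvN edges) c (List.mem_singleton.2 rfl)
  -- R(c) is closed, so ch ∈ R(c) and R(ch) ⊆ R(c)
  have hRcClosed := pv_reach_closed edges [c]
    (by intro x hx; simp only [List.mem_singleton] at hx; subst hx; exact hcU)
  have hchRc : ch ∈ pvReach edges c := hRcClosed c hcRc ch hch
  have hsub : ∀ y ∈ pvReach edges ch, y ∈ pvReach edges c := by
    have := pv_closed_absorb edges (pvReach edges c) [ch] hRcClosed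
      (by intro x hx; simp only [List.mem_singleton] at hx; subst hx; exact hchRc) (pvN edges)
    exact this
  -- c ∉ R(ch): Pre_ forbids a cycle through c, and R(ch) ⊆ closure of succs c
  have hcnot : c ∉ pvReach edges ch := by
    intro hcyc
    exact hpre c hc (pv_iterate_mono edges [ch] (pvSuccs edges c) (pvN edges)
      (by intro x hx; simp only [List.mem_singleton] at hx; subst hx; exact hch) c hcyc)
  -- strict cardinality drop via nodup lists
  obtain ⟨n', hn'⟩ : ∃ n', pvN edges = n' + 1 := ⟨pvN edges - 1, by have := pv_pvN_pos edges; omega⟩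
  have hnd1 : (pvReach edges ch).Nodup := by
    unfold pvReach; rw [hn']; exact pv_nodup_iterate edges [ch] n'
  have hnd2 : (pvReach edges c).Nodup := by
    unfold pvReach; rw [hn']; exact pv_nodup_iterate edges [c] n'
  have hcard : (pvReach edges ch).toFinset.card < (pvReach edges c).toFinset.card := by
    apply Finset.card_lt_card
    refine (Finset.ssubset_iff_of_subset ?_).2
      ⟨c, List.mem_toFinset.2 hcRc, fun hcm => hcnot (List.mem_toFinset.1 hcm)⟩
    intro a ha
    exact List.mem_toFinset.2 (hsub a (List.mem_toFinset.1 ha))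
  unfold pvM
  rwa [List.toFinset_card_of_nodup hnd1, List.toFinset_card_of_nodup hnd2] at hcard

-- a running max of a projection pulls a `max` out of the initial accumulator
lemma pv_foldl_max_init (v : Int × Int → Int) :
    ∀ (l : List (Int × Int)) (a b : Int),
      l.foldl (fun x y => max x (v y)) (max a b) = max (l.foldl (fun x y => max x (v y)) a) b := by
  intro l
  induction l with
  | nil => intro a b; rfl
  | cons y t ih =>
    intro a b
    simp only [List.foldl_cons]
    rw [max_right_comm, ih]

-- the dfs accumulator never decreases, so dfs values are ≥ 0
lemma pvDfsList_ge (edges : List (Int × Int × Int)) (adj : PySem.Dict Int (List (Int × Int))) (c : Int) :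
    ∀ (l : List (Int × Int)) (best : Int), best ≤ pvDfsList edges adj c l best := by
  intro l
  induction l with
  | nil => intro best; simp [pvDfsList]
  | cons p t ih =>
    intro best
    rcases p with ⟨ch, w⟩
    rw [pvDfsList]
    split
    · exact le_trans (le_max_left _ _) (ih _)
    · exact ih best

lemma pvDfsNode_nonneg (edges : List (Int × Int × Int)) (adj : PySem.Dict Int (List (Int × Int))) (c : Int) :
    0 ≤ pvDfsNode edges adj c := by
  rw [pvDfsNode]; exact pvDfsList_ge edges adj c _ 0

-- shifting every enqueued distance by d shifts the folded maximum by d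
lemma pv_shift (edges : List (Int × Int × Int)) (adj : PySem.Dict Int (List (Int × Int))) (c : Int) :
    ∀ (l : List (Int × Int)), (∀ p ∈ l, pvM edges p.1 < pvM edges c) → ∀ (d acc : Int),
      (l.map fun p => (p.1, d + p.2)).foldl
          (fun a p => max a (p.2 + pvDfsNode edges adj p.1)) (d + acc)
        = d + pvDfsList edges adj c l acc := by
  intro l
  induction l with
  | nil => intro _ d acc; simp [pvDfsList]
  | cons p t ih =>
    intro hl d acc
    rcases p with ⟨ch, w⟩
    have hp := hl (ch, w) List.mem_cons_self
    simp only [List.map_cons, List.foldl_cons]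
    rw [pvDfsList, dif_pos hp]
    have : max (d + acc) ((d + w) + pvDfsNode edges adj ch)
        = d + max acc (w + pvDfsNode edges adj ch) := by
      rw [add_assoc, max_add_add_left]
    rw [this, ih (fun p hp' => hl p (List.mem_cons_of_mem _ hp'))]

-- the BFS loop computes the maximum over queue entries of distance + dfs value
lemma pv_loop_eq (edges : List (Int × Int × Int)) (adj : PySem.Dict Int (List (Int × Int))) (K : Nat)
    (Hadj : ∀ (c : Int) (p : Int × Int), p ∈ adj.getD c [] → p.1 ∈ pvSuccs edges c)
    (Hkey : ∀ c ∈ pvReach edges 1, ∀ ch ∈ pvSuccs edges c,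
      ch ∈ pvReach edges 1 ∧ pvM edges ch < pvM edges c)
    (H2 : ∀ c : Int, (adj.getD c []).length < K) :
    ∀ (q : List (Int × Int)) (m : Int), (∀ p ∈ q, p.1 ∈ pvReach edges 1) →
      pvLoopA edges adj K q m
        = q.foldl (fun a p => max a (p.2 + pvDfsNode edges adj p.1)) m := by
  intro q m
  fun_induction pvLoopA edges adj K q m with
  | case1 m => intro _; rfl
  | case2 c d q m m' children h ih =>
    intro hq
    have hc : c ∈ pvReach edges 1 := hq (c, d) List.mem_cons_self
    have hchild : ∀ p ∈ children, p.1 ∈ pvReach edges 1 ∧ pvM edges p.1 < pvM edges c := by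
      intro p hp
      exact Hkey c hc p.1 (Hadj c p (by simpa only [children] using hp))
    have hinv : ∀ p ∈ q ++ children.map (fun p => (p.1, d + p.2)), p.1 ∈ pvReach edges 1 := by
      intro p hp
      rcases List.mem_append.1 hp with h1 | h1
      · exact hq p (List.mem_cons_of_mem _ h1)
      · rcases List.mem_map.1 h1 with ⟨p0, hp0, rfl⟩
        exact (hchild p0 hp0).1
    have hm' : m' = max m d := by
      simp only [m']
      split
      next hgt => exact (max_eq_right (le_of_lt hgt)).symm
      next hle => exact (max_eq_left (not_lt.1 hle)).symm
    rw [ih hinv, hm', List.foldl_append, List.foldl_cons,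
        pv_foldl_max_init _ q m d, max_comm _ d,
        pv_foldl_max_init]
    have hd : (children.map fun p => (p.1, d + p.2)).foldl
        (fun a p => max a (p.2 + pvDfsNode edges adj p.1)) d = d + pvDfsNode edges adj c := by
      have := pv_shift edges adj c children (fun p hp => (hchild p hp).2) d 0
      rw [add_zero] at this
      rw [this, pvDfsNode]
    rw [hd, max_comm,
        pv_foldl_max_init _ q m (d + pvDfsNode edges adj c)]
  | case3 c d q m m' children h =>
    intro hq
    have hc : c ∈ pvReach edges 1 := hq (c, d) List.mem_cons_self
    exact absurd ⟨fun p hp => (Hkey c hc p.1 (Hadj c p (by simpa only [children] using hp))).2,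
      by simpa only [children] using H2 c⟩ h

-- ===== VERDICT (by name: the statement is the Claim_ definition above) =====
theorem longestPathFromRoot_spec : Claim_equal_longestPathFromRoot := by
  intro cityCount edges _ hpre
  unfold Spec_longestPathFromRoot longestPathFromRoot longestPathFromRoot_alt
  have hadj : ∀ c : Int,
      (edges.foldl (fun d e => d.modify e.1 [] (· ++ [e.2])) PySem.Dict.empty).getD c []
        = (edges.filter (fun e => e.1 == c)).map (·.2) := by
    intro c
    rw [PySem.Dict.getD_foldl_modify_append, PySem.Dict.getD_empty, List.nil_append]
  have Hadj : ∀ (c : Int) (p : Int × Int),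
      p ∈ (edges.foldl (fun d e => d.modify e.1 [] (· ++ [e.2])) PySem.Dict.empty).getD c [] →
      p.1 ∈ pvSuccs edges c := by
    intro c p hp
    rw [hadj c] at hp
    rcases List.mem_map.1 hp with ⟨e, hef, rfl⟩
    exact List.mem_map.2 ⟨e, hef, rfl⟩
  have H2 : ∀ c : Int,
      ((edges.foldl (fun d e => d.modify e.1 [] (· ++ [e.2])) PySem.Dict.empty).getD c []).length
        < edges.length + 1 := by
    intro c
    rw [hadj c, List.length_map]
    exact Nat.lt_succ_of_le (List.length_filter_le _ _)
  have Hkey := pv_key cityCount edges hpre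
  have hone : (1 : Int) ∈ pvReach edges 1 :=
    pv_subset_iterate edges [1] (pvN edges) 1 (List.mem_singleton.2 rfl)
  rw [pv_loop_eq edges _ _ Hadj Hkey H2 [(1, 0)] 0
        (by intro p hp; simp only [List.mem_singleton] at hp; subst hp; exact hone),
      List.foldl_cons, List.foldl_nil, zero_add,
      max_eq_right (pvDfsNode_nonneg _ _ _)]
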